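-- pv_equiv track=rewrite | github.com/sakamototaisei/python | Python_text/test_3.py | get_first_words_weights
-- ===== SOURCE A (Python) =====
-- from collections import defaultdict
--
-- BEGIN = '__BEGIN__'
--
-- def get_first_word_and_count(three_words_count):
--     """最初の単語を選択するための辞書データを生成する"""
--     firstd_word_count = defaultdict(int)
--
--     for three_words, count in three_words_count.items():
--         # BERGINで始まるもののみを取り出す
--         if three_words[0] == BEGIN:
--             next_word = three_words[1]
--             # 出現回数を加算
--             firstd_word_count[next_word] += count
--
--     return firstd_word_count
--
-- def get_first_words_weights(three_words_count):
--     """最初の単語と重みのリストを作成する"""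
--     firstd_word_count = get_first_word_and_count(three_words_count)
--     # 単語と重み(出現回数)を格納するリスト
--     words = []
--     weights = []
--     for word, count in firstd_word_count.items():
--         # 単語と重みをリストに追加
--         words.append(word)
--         weights.append(count)
--
--     return words, weights
-- ===== SOURCE B (Python) =====
-- BEGIN = '__BEGIN__'
--
-- def get_first_words_weights(three_words_count):
--     """最初の単語と重みのリストを作成する"""
--     # comprehension style: filter once, ordered-dedup the words, then one grouped sum per word
--     pairs = [(t[1], c) for t, c in three_words_count.items() if t[0] == BEGIN]
--     words = list(dict.fromkeys(w for w, _ in pairs))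
--     weights = [sum(c for w, c in pairs if w == word) for word in words]
--     return words, weights
-- ===== Notes on version B (the rewrite author's own statement) =====
-- stated objective: simpler
-- what changed: Replaces the helper's defaultdict counter plus a second unzip loop by a filter-map comprehension, an ordered dedup of the words, and one grouped sum per distinct word.
import Mathlib
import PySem

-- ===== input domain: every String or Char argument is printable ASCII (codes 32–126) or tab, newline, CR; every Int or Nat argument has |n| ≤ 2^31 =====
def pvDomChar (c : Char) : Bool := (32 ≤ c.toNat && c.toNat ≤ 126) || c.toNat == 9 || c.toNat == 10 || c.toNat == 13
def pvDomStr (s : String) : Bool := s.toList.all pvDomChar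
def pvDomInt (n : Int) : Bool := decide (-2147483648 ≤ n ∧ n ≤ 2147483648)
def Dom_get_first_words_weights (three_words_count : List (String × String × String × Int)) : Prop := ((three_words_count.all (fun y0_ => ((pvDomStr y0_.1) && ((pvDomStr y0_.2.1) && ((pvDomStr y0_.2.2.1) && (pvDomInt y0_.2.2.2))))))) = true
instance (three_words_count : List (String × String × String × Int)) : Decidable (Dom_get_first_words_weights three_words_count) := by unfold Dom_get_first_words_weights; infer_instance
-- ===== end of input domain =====

-- B replaces the defaultdict-counter helper plus the unzip loop by a filter comprehension,
-- an ordered dedup of the words, and one grouped sum per distinct word (objective: simpler).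

-- ===== PORT A =====
def get_first_word_and_count (three_words_count : List (String × String × String × Int)) : PySem.Dict String Int :=
  three_words_count.foldl
    (fun d p => if p.1 == "__BEGIN__" then d.modify p.2.1 0 (· + p.2.2.2) else d)
    PySem.Dict.empty

def get_first_words_weights (three_words_count : List (String × String × String × Int)) : List String × List Int :=
  let firstd_word_count := get_first_word_and_count three_words_count
  firstd_word_count.items.foldl
    (fun (acc : List String × List Int) kv => (acc.1 ++ [kv.1], acc.2 ++ [kv.2]))
    ([], [])

-- ===== PORT B =====
def get_first_words_weights_alt (three_words_count : List (String × String × String × Int)) : List String × List Int :=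
  let pairs := (three_words_count.filter (fun p => p.1 == "__BEGIN__")).map (fun p => (p.2.1, p.2.2.2))
  let words := PySem.List.dedup (pairs.map (·.1))
  let weights := words.map (fun word => ((pairs.filter (fun q => q.1 == word)).map (·.2)).sum)
  (words, weights)

-- ===== PRECONDITION & SPEC =====
def Spec_get_first_words_weights (three_words_count : List (String × String × String × Int)) (out : List String × List Int) : Prop := out = get_first_words_weights_alt three_words_count
instance (three_words_count : List (String × String × String × Int)) (out : List String × List Int) : Decidable (Spec_get_first_words_weights three_words_count out) := by unfold Spec_get_first_words_weights; infer_instance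

-- ===== CLAIM (what is proved, stated in full; the proofs are below) =====
def Claim_equal_get_first_words_weights : Prop := ∀ (three_words_count : List (String × String × String × Int)), Dom_get_first_words_weights three_words_count → Spec_get_first_words_weights three_words_count (get_first_words_weights three_words_count)

-- ===== LEMMAS AND PROOFS =====

-- the counting loop of A's helper: each key ends up holding the sum of the counts filed under it
theorem getD_foldl_modify_sum {κ : Type} [BEq κ] [LawfulBEq κ] [DecidableEq κ]
    (l : List (κ × Int)) (d : PySem.Dict κ Int) (c : κ) :
    (l.foldl (fun d p => d.modify p.1 0 (· + p.2)) d).getD c 0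
      = d.getD c 0 + ((l.filter (fun q => q.1 == c)).map (·.2)).sum := by
  induction l generalizing d with
  | nil => simp
  | cons p t ih =>
    simp only [List.foldl_cons, List.filter_cons]
    by_cases h : c = p.1
    · subst h; simp [ih, add_assoc]
    · have h' : ¬ p.1 = c := fun hh => h hh.symm
      simp [ih, h, h', PySem.Dict.getD_modify]

-- Set.update of the empty set is ordered dedup (glue between the two library spellings)
theorem set_update_empty_eq_dedup {α : Type} [BEq α] [LawfulBEq α] (l : List α) :
    PySem.Set.update ([] : PySem.Set α) l = PySem.List.dedup l := by
  rw [PySem.List.dedup_eq_ofList, PySem.Set.ofList_eq_foldl]; rfl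

-- ===== VERDICT (by name: the statement is the Claim_ definition above) =====
theorem get_first_words_weights_spec : Claim_equal_get_first_words_weights := by
  intro l _
  unfold Spec_get_first_words_weights get_first_words_weights get_first_words_weights_alt get_first_word_and_count
  simp only
  rw [← List.foldl_filter (p := fun p : String × String × String × Int => p.1 == "__BEGIN__")
        (f := fun d p => PySem.Dict.modify d p.2.1 0 (· + p.2.2.2))]
  set fl := l.filter (fun p : String × String × String × Int => p.1 == "__BEGIN__") with hfl
  set d := fl.foldl (fun d p => PySem.Dict.modify d p.2.1 0 (· + p.2.2.2)) PySem.Dict.empty with hd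
  have hnd : d.keys.Nodup := by
    rw [hd]
    exact PySem.Dict.nodup_keys_foldl_modify_key fl (fun p => p.2.1) 0
      (fun _ p v => v + p.2.2.2) PySem.Dict.empty (by simp)
  have hkeys : d.keys = PySem.List.dedup (fl.map (fun p => p.2.1)) := by
    rw [hd, PySem.Dict.keys_foldl_modify_key fl (fun p => p.2.1) 0 (fun _ p v => v + p.2.2.2)]
    simp only [PySem.Dict.keys_empty]
    exact set_update_empty_eq_dedup _
  have hdpairs : d = (fl.map (fun p => (p.2.1, p.2.2.2))).foldl
      (fun d p => PySem.Dict.modify d p.1 0 (· + p.2)) PySem.Dict.empty := by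
    rw [hd, List.foldl_map]
  have hval : ∀ k, d.getD k 0
      = ((((fl.map (fun p => (p.2.1, p.2.2.2))).filter (fun q => q.1 == k)).map (·.2)).sum) := by
    intro k
    rw [hdpairs, getD_foldl_modify_sum]
    simp
  rw [PySem.Dict.items_eq_map_keys d hnd 0]
  simp only [List.foldl_map]
  have hunzip := PySem.List.foldl_prod_mk (fun (x : List String) (y : String) => x ++ [y])
      (fun (x : List Int) (y : String) => x ++ [d.getD y 0]) d.keys [] []
  simp only [] at hunzip
  rw [hunzip]
  simp only [PySem.List.foldl_append_singleton, PySem.List.foldl_append_singleton_eq_map,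
    List.nil_append, List.map_map, Function.comp_def, PySem.List.dedup_eq_ofList] at hkeys ⊢
  refine Prod.ext hkeys ?_
  rw [hkeys]
  exact List.map_congr_left (fun k _ => hval k)
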